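-- pv_equiv track=rewrite | github.com/jerovernay/Practicas | Parciales/python/Parcial05.py | subsecuencias_mas_larga
-- ===== SOURCE A (Python) =====
-- def subsecuencias_mas_larga(s: list[int]) -> int:
--
--     res = [0,0]
--
--     cant = 0
--     indice = 0
--
--     i = 0
--     while i < len(s):
--         if s[i] == "perro" or s[i] == "gato" :
--             indice = i - cant
--             cant+=1
--             if cant > res[0]:
--                 res = [cant, indice]
--         else:
--             cant= 0
--             indice = 0
--         i+=1
--
--     return res[1]
-- ===== SOURCE B (Python) =====
-- from itertools import groupby
--
-- def subsecuencias_mas_larga(s: list[int]) -> int: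
--     best_len = 0
--     best_start = 0
--     pos = 0
--     for match, grp in groupby(s, key=lambda x: x == "perro" or x == "gato"):
--         n = sum(1 for _ in grp)
--         if match and n > best_len:
--             best_len = n
--             best_start = pos
--         pos += n
--     return best_start
-- ===== Notes on version B (the rewrite author's own statement) =====
-- stated objective: idiomatic
-- what changed: Replaced the element-by-element while loop with index/counter bookkeeping by an itertools.groupby pass over maximal runs, keeping the start of the first strictly-longest matching run.
import Mathlib
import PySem

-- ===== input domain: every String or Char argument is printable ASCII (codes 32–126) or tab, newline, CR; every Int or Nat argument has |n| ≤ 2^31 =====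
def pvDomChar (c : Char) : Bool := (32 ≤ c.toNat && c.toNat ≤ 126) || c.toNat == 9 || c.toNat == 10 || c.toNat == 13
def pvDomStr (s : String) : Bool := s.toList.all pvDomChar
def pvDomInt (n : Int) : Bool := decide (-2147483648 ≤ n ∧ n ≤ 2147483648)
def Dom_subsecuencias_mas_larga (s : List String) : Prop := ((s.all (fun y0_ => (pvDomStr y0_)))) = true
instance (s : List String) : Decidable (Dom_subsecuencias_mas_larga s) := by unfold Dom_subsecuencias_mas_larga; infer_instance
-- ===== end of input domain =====

-- B replaces A's element-by-element while loop by a groupby-style pass over maximal runs (idiomatic decomposition, same cost).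

-- ===== PORT A =====
-- state: current position i, current run length cant, last computed indice, res = (best length, best start)
def loopA : List String → Int → Int → Int → Int × Int → Int × Int
  | [], _, _, _, res => res
  | x :: rest, i, cant, _indice, res =>
    if x == "perro" || x == "gato" then
      let indice := i - cant
      let cant' := cant + 1
      let res' := if cant' > res.1 then (cant', indice) else res
      loopA rest (i + 1) cant' indice res'
    else
      loopA rest (i + 1) 0 0 res

def subsecuencias_mas_larga (s : List String) : Int :=
  (loopA s 0 0 0 (0, 0)).2

-- ===== PORT B =====
def matchKey (x : String) : Bool := x == "perro" || x == "gato"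

-- itertools.groupby: list of (key, group length) for maximal runs of equal key
def groupsB : List String → List (Bool × Int)
  | [] => []
  | x :: xs =>
    let k := matchKey x
    (k, 1 + (xs.takeWhile (fun y => matchKey y == k)).length) ::
      groupsB (xs.dropWhile (fun y => matchKey y == k))
termination_by s => s.length
decreasing_by
  simpa using Nat.lt_succ_of_le ((List.dropWhile_sublist _).length_le)

def loopB : List (Bool × Int) → Int → Int → Int → Int
  | [], _bestLen, bestStart, _pos => bestStart
  | (k, n) :: gs, bestLen, bestStart, pos =>
    if k = true ∧ n > bestLen then loopB gs n pos (pos + n)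
    else loopB gs bestLen bestStart (pos + n)

def subsecuencias_mas_larga_alt (s : List String) : Int :=
  loopB (groupsB s) 0 0 0

-- ===== PRECONDITION & SPEC =====
def Spec_subsecuencias_mas_larga (s : List String) (out : Int) : Prop := out = subsecuencias_mas_larga_alt s
instance (s : List String) (out : Int) : Decidable (Spec_subsecuencias_mas_larga s out) := by unfold Spec_subsecuencias_mas_larga; infer_instance

-- ===== CLAIM (what is proved, stated in full; the proofs are below) =====
def Claim_equal_subsecuencias_mas_larga : Prop := ∀ (s : List String), Dom_subsecuencias_mas_larga s → Spec_subsecuencias_mas_larga s (subsecuencias_mas_larga s)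

-- ===== LEMMAS AND PROOFS =====

-- the `indice` state variable is dead: it is recomputed before any use
lemma loopA_indice_irrel (s : List String) : ∀ i cant ind ind' res,
    loopA s i cant ind res = loopA s i cant ind' res := by
  induction s with
  | nil => intros; rfl
  | cons x rest ih =>
    intro i cant ind ind' res
    simp only [loopA]

lemma loopA_congr (s : List String) (i i' c c' ind ind' : Int) (res res' : Int × Int)
    (h1 : i = i') (h2 : c = c') (h3 : res = res') :
    loopA s i c ind res = loopA s i' c' ind' res' := by
  subst h1; subst h2; subst h3
  exact loopA_indice_irrel s i c ind ind' res

-- a run of matching elements entered with cant = c ≤ res.1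
lemma loopA_run_match (g : List String) : ∀ rest i c ind r0 r1,
    (∀ y ∈ g, matchKey y = true) → c ≤ r0 →
    loopA (g ++ rest) i c ind (r0, r1) =
      loopA rest (i + g.length) (c + g.length) (i - c)
        (if c + g.length > r0 then (c + g.length, i - c) else (r0, r1)) := by
  induction g with
  | nil =>
    intro rest i c ind r0 r1 _ hc
    simp only [List.nil_append, List.length_nil, Nat.cast_zero, add_zero]
    rw [if_neg (by omega)]
    exact loopA_indice_irrel _ _ _ _ _ _
  | cons y g' ih =>
    intro rest i c ind r0 r1 hall hc
    have hy : matchKey y = true := hall y (by simp)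
    simp only [List.cons_append, loopA]
    rw [if_pos (by simpa [matchKey] using hy)]
    by_cases hgt : c + 1 > r0
    · rw [if_pos (show c + 1 > (r0, r1).1 from hgt)]
      rw [ih rest (i+1) (c+1) (i - c) (c+1) (i - c)
            (fun z hz => hall z (by simp [hz])) (le_refl _)]
      by_cases h2 : c + 1 + (g'.length : Int) > c + 1
      · rw [if_pos h2, if_pos (show c + (((y :: g').length : Nat) : Int) > r0 by push_cast [List.length_cons]; omega)]
        apply loopA_congr <;> first
          | rfl
          | (push_cast [List.length_cons]; omega)
          | (simp only [Prod.mk.injEq]; refine ⟨?_, ?_⟩ <;> push_cast [List.length_cons] <;> try omega)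
      · rw [if_neg h2, if_pos (show c + (((y :: g').length : Nat) : Int) > r0 by push_cast [List.length_cons]; omega)]
        apply loopA_congr <;> first
          | rfl
          | (push_cast [List.length_cons]; omega)
          | (simp only [Prod.mk.injEq]; refine ⟨?_, ?_⟩ <;> push_cast [List.length_cons] <;> try omega)
    · rw [if_neg (show ¬ (c + 1 > (r0, r1).1) from hgt)]
      rw [ih rest (i+1) (c+1) (i - c) r0 r1
            (fun z hz => hall z (by simp [hz])) (by omega)]
      by_cases h2 : c + 1 + (g'.length : Int) > r0
      · rw [if_pos h2, if_pos (show c + (((y :: g').length : Nat) : Int) > r0 by push_cast [List.length_cons]; omega)]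
        apply loopA_congr <;> first
          | rfl
          | (push_cast [List.length_cons]; omega)
          | (simp only [Prod.mk.injEq]; refine ⟨?_, ?_⟩ <;> push_cast [List.length_cons] <;> try omega)
      · rw [if_neg h2, if_neg (show ¬ (c + (((y :: g').length : Nat) : Int) > r0) by push_cast [List.length_cons] at h2 ⊢; omega)]
        apply loopA_congr <;> first
          | rfl
          | (push_cast [List.length_cons]; omega)

-- a run of non-matching elements entered with cant = 0
lemma loopA_run_nomatch (g : List String) : ∀ rest i res,
    (∀ y ∈ g, matchKey y = false) →
    loopA (g ++ rest) i 0 0 res = loopA rest (i + g.length) 0 0 res := by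
  induction g with
  | nil => intro rest i res _; simp
  | cons y g' ih =>
    intro rest i res hall
    have hy : matchKey y = false := hall y (by simp)
    simp only [List.cons_append, loopA]
    rw [if_neg (by simpa [matchKey] using hy)]
    rw [ih rest (i+1) res (fun y hy => hall y (by simp [hy]))]
    congr 1
    push_cast [List.length_cons]; omega

-- a leading non-matching element makes the incoming cant/indice irrelevant
lemma loopA_head_nomatch (x : String) (rest : List String) (i c ind c' ind' : Int)
    (res : Int × Int) (hx : matchKey x = false) :
    loopA (x :: rest) i c ind res = loopA (x :: rest) i c' ind' res := by
  simp only [loopA]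
  rw [if_neg (by simpa [matchKey] using hx), if_neg (by simpa [matchKey] using hx)]

lemma head_dropWhile_false {α : Type} (p : α → Bool) :
    ∀ (l : List α) (x : α) (rest : List α), l.dropWhile p = x :: rest → p x = false := by
  intro l
  induction l with
  | nil => intro x rest h; simp at h
  | cons a l' ih =>
    intro x rest h
    by_cases ha : p a = true
    · rw [List.dropWhile_cons_of_pos ha] at h; exact ih x rest h
    · rw [List.dropWhile_cons_of_neg (by simpa using ha)] at h
      cases h; simpa using ha

-- main invariant: A's loop from a fresh run boundary computes B's fold over the remaining groups
lemma main_inv : ∀ (n : Nat) (s : List String), s.length ≤ n → ∀ i ind r0 r1, 0 ≤ r0 →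
    (loopA s i 0 ind (r0, r1)).2 = loopB (groupsB s) r0 r1 i := by
  intro n
  induction n with
  | zero =>
    intro s hs i ind r0 r1 _
    have : s = [] := List.eq_nil_of_length_eq_zero (Nat.le_zero.mp hs)
    subst this; simp [loopA, groupsB, loopB]
  | succ m ih =>
    intro s hs i ind r0 r1 hr0
    match s with
    | [] => simp [loopA, groupsB, loopB]
    | x :: xs =>
      simp only [groupsB]
      set k := matchKey x with hk
      set g := xs.takeWhile (fun y => matchKey y == k) with hg
      set rest := xs.dropWhile (fun y => matchKey y == k) with hrest
      have hsplit : xs = g ++ rest := (List.takeWhile_append_dropWhile).symm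
      have hrlen : rest.length ≤ m := by
        have h1 : rest.length ≤ xs.length := by
          rw [hrest]; exact (List.dropWhile_sublist _).length_le
        simp only [List.length_cons] at hs
        omega
      have hgall : ∀ y ∈ g, matchKey y = k := by
        intro y hy
        have := List.mem_takeWhile_imp (hg ▸ hy)
        simpa using this
      cases hkv : k with
      | true =>
        -- x :: g is a matching run
        have hx : matchKey x = true := by rw [hk] at hkv; exact hkv
        have hrun := loopA_run_match (x :: g) rest i 0 ind r0 r1
          (by intro y hy; rcases List.mem_cons.mp hy with h | h
              · subst h; exact hx
              · exact hkv ▸ hgall y h) hr0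
        have hxg : (x :: xs) = (x :: g) ++ rest := by simp [hsplit]
        rw [hxg, hrun]
        simp only [List.length_cons, loopB]
        by_cases hb : (1 + (g.length : Int)) > r0
        · rw [if_pos (by push_cast; omega), if_pos (show True ∧ (1 + (g.length:Int) > r0) from ⟨trivial, hb⟩)]
          have hstep : ∀ ind2, (loopA rest (i + ((g.length : Int) + 1)) (0 + ((g.length:Int) + 1)) ind2 ((0 + ((g.length:Int)+1)), i - 0)).2
              = loopB (groupsB rest) (0 + ((g.length:Int)+1)) (i - 0) (i + ((g.length:Int)+1)) := by
            intro ind2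
            match hr : rest with
            | [] => simp [loopA, groupsB, loopB]
            | z :: zs =>
              have hz : (fun y => matchKey y == k) z = false := head_dropWhile_false _ xs z zs (by rw [← hrest])
              have hz' : matchKey z = false := by
                simp only [hkv] at hz; simpa using hz
              rw [loopA_head_nomatch z zs _ _ _ 0 0 _ hz']
              exact ih (z :: zs) hrlen _ 0 _ _ (by push_cast; omega)
          have := hstep (i - 0)
          push_cast at this ⊢
          simp only [sub_zero, zero_add] at this ⊢
          rw [show (1 + (g.length:Int)) = (g.length:Int) + 1 by omega]
          exact this
        · rw [if_neg (by push_cast at hb ⊢; omega), if_neg (by rintro ⟨_, h⟩; push_cast at h; omega)]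
          have hstep : ∀ ind2, (loopA rest (i + (1 + (g.length:Int))) (0 + ((g.length:Int)+1)) ind2 (r0, r1)).2
              = loopB (groupsB rest) r0 r1 (i + (1 + (g.length:Int))) := by
            intro ind2
            match hr : rest with
            | [] => simp [loopA, groupsB, loopB]
            | z :: zs =>
              have hz : (fun y => matchKey y == k) z = false := head_dropWhile_false _ xs z zs (by rw [← hrest])
              have hz' : matchKey z = false := by
                simp only [hkv] at hz; simpa using hz
              rw [loopA_head_nomatch z zs _ _ _ 0 0 _ hz']
              exact ih (z :: zs) hrlen _ 0 _ _ hr0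
          have := hstep (i - 0)
          push_cast at this ⊢
          rw [show i + ((1:Int) + (g.length:Int)) = i + (1 + (g.length:Int)) by omega] at this
          convert this using 3 <;> push_cast <;> omega
      | false =>
        -- x :: g is a non-matching run
        have hx : matchKey x = false := by rw [hk] at hkv; exact hkv
        simp only [loopA]
        rw [if_neg (by simpa [matchKey] using hx)]
        rw [hsplit, loopA_run_nomatch g rest (i+1) (r0, r1) (fun y hy => hkv ▸ hgall y hy)]
        simp only [loopB]
        rw [if_neg (by rintro ⟨h, _⟩; exact absurd h (by simp))]
        have : (loopA rest (i + 1 + (g.length:Int)) 0 0 (r0, r1)).2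
            = loopB (groupsB rest) r0 r1 (i + 1 + (g.length:Int)) := by
          match hr : rest with
          | [] => simp [loopA, groupsB, loopB]
          | z :: zs => exact ih (z :: zs) hrlen _ 0 _ _ hr0
        rw [this]
        congr 1
        push_cast; omega

-- ===== VERDICT (by name: the statement is the Claim_ definition above) =====
theorem subsecuencias_mas_larga_spec : Claim_equal_subsecuencias_mas_larga := by
  intro s _
  unfold Spec_subsecuencias_mas_larga subsecuencias_mas_larga subsecuencias_mas_larga_alt
  exact main_inv s.length s (le_refl _) 0 0 0 0 (le_refl _)
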